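-- pv_equiv track=rewrite | github.com/ciestupinan/coding-challenges | lazy-lemmings/lemmings.py | furthest
-- ===== SOURCE A (Python) =====
-- def furthest(num_holes, black_holes):
--     """Find longest distance between a hole and a cafe."""
--
--     """ Loop through all holes
--         Count # of steps needed to get to black hole from current hole
--         When you get to the black hole, save distance
--         Move to next i
--
--         Return largest distance
--     """
--
--     distances = set()
--     distance = 0
--
--     for i in range(len(num_holes)):
--
--         for j in range(i, len(num_holes)):
--             if j in black_holes:
--                 distances.add(distance)
--                 distance = 0
--                 break
--             else:
--                 distance += 1
--
--     return max(distances)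
-- ===== SOURCE B (Python) =====
-- def furthest(num_holes, black_holes):
--     """Find longest distance between a hole and a cafe."""
--     blacks = set(black_holes)
--     dists = []
--     d = None  # distance from current index to the next black hole, if any
--     for i in reversed(range(len(num_holes))):
--         if i in blacks:
--             d = 0
--         elif d is not None:
--             d += 1
--         if d is not None:
--             dists.append(d)
--     return max(dists)
-- ===== Notes on version B (the rewrite author's own statement) =====
-- stated objective: faster
-- what changed: Replaced the nested forward scans (for every hole, rescan forward for the next black-hole index) by a single backward pass that maintains the distance to the next black hole and collects all distances in one loop.
import Mathlib
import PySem

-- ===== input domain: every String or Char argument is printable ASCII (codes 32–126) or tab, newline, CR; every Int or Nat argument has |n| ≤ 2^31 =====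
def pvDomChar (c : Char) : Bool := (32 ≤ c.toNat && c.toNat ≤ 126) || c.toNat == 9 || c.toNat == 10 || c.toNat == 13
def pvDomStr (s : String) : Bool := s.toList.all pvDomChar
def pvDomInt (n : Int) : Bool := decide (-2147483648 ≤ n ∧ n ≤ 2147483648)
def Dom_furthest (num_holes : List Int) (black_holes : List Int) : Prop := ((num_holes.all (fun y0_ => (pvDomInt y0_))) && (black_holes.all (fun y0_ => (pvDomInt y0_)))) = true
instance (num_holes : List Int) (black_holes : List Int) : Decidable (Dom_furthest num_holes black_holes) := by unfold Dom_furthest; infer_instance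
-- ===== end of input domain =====

-- B replaces A's quadratic nested forward scans by one backward pass that tracks the
-- distance to the next black hole (objective: faster, O(n) instead of O(n^2)).

-- ===== PORT A =====
-- inner loop `for j in range(i, len(num_holes)): …` with its break; state = (distances, distance)
def furthestInnerA (black_holes : List Int) : List Int → PySem.Set Int → Int → PySem.Set Int × Int
  | [], S, d => (S, d)
  | j :: js, S, d =>
      if black_holes.contains j then (PySem.Set.add S d, 0)
      else furthestInnerA black_holes js S (d + 1)

def furthest (num_holes : List Int) (black_holes : List Int) : Int :=
  let n : Int := num_holes.length
  let st := (PySem.List.pyRange 0 n 1).foldl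
      (fun (st : PySem.Set Int × Int) i =>
        furthestInnerA black_holes (PySem.List.pyRange i n 1) st.1 st.2)
      (PySem.Set.empty, 0)
  -- max(distances) raises ValueError on an empty set; Pre_furthest excludes those inputs
  (PySem.List.max? st.1 (fun x => x)).getD 0

-- ===== PORT B =====
-- the backward loop of Source B: d = distance to next black hole (None if there is none ahead)
def furthestAltLoop (blacks : PySem.Set Int) : List Int → Option Int → List Int → List Int
  | [], _, dists => dists
  | i :: rest, d, dists =>
      let d' : Option Int :=
        if PySem.Set.contains blacks i then some 0
        else match d with | some v => some (v + 1) | none => none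
      furthestAltLoop blacks rest d' (match d' with | some v => dists ++ [v] | none => dists)

def furthest_alt (num_holes : List Int) (black_holes : List Int) : Int :=
  let blacks := PySem.Set.ofList black_holes
  let dists := furthestAltLoop blacks
      (PySem.List.pyRange 0 (num_holes.length : Int) 1).reverse none []
  -- max(dists) raises ValueError on an empty list; Pre_furthest excludes those inputs
  (PySem.List.max? dists (fun x => x)).getD 0

-- ===== PRECONDITION & SPEC =====
-- Pre_ excludes inputs with no black-hole index inside range(len(num_holes)): there both A and B
-- raise ValueError (max of an empty collection).
def Pre_furthest (num_holes : List Int) (black_holes : List Int) : Prop :=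
  ∃ j ∈ black_holes, 0 ≤ j ∧ j < (num_holes.length : Int)
instance (num_holes : List Int) (black_holes : List Int) : Decidable (Pre_furthest num_holes black_holes) := by unfold Pre_furthest; infer_instance

def pvWitness_furthest : List Int × List Int := ([5, 7, 9], [1])

def Spec_furthest (num_holes : List Int) (black_holes : List Int) (out : Int) : Prop := out = furthest_alt num_holes black_holes
instance (num_holes : List Int) (black_holes : List Int) (out : Int) : Decidable (Spec_furthest num_holes black_holes out) := by unfold Spec_furthest; infer_instance

-- ===== CLAIM (what is proved, stated in full; the proofs are below) =====
def Claim_equal_furthest : Prop := ∀ (num_holes : List Int) (black_holes : List Int), Dom_furthest num_holes black_holes → Pre_furthest num_holes black_holes → Spec_furthest num_holes black_holes (furthest num_holes black_holes)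

-- ===== LEMMAS AND PROOFS =====

-- distance from the head of the index list to its first black-hole index
def nd (blk : Int → Bool) : List Int → Option Int
  | [] => none
  | j :: js => if blk j then some 0 else (nd blk js).map (· + 1)

-- the multiset of recorded distances, one per start index that still sees a black hole
def vals (blk : Int → Bool) (n : Int) (L : List Int) : List Int :=
  L.filterMap (fun k => nd blk (PySem.List.pyRange k n 1))

theorem innerA_none (bh : List Int) (js : List Int) : ∀ (S : PySem.Set Int) (d : Int),
    nd (fun j => bh.contains j) js = none →
    furthestInnerA bh js S d = (S, d + (js.length : Int)) := by
  induction js with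
  | nil => intro S d _; simp [furthestInnerA]
  | cons j js ih =>
      intro S d h
      by_cases hb : j ∈ bh
      · simp [nd, hb] at h
      · have h2 : nd (fun j => bh.contains j) js = none := by
          simpa [nd, hb] using h
        rw [show furthestInnerA bh (j :: js) S d = furthestInnerA bh js S (d + 1) from by
          simp [furthestInnerA, hb]]
        rw [ih S (d + 1) h2]
        simp only [List.length_cons, Prod.mk.injEq, true_and]
        push_cast; ring

theorem innerA_some (bh : List Int) (js : List Int) : ∀ (S : PySem.Set Int) (d v : Int),
    nd (fun j => bh.contains j) js = some v →
    furthestInnerA bh js S d = (PySem.Set.add S (d + v), 0) := by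
  induction js with
  | nil => intro S d v h; simp [nd] at h
  | cons j js ih =>
      intro S d v h
      by_cases hb : j ∈ bh
      · have hv : v = 0 := by simp [nd, hb] at h; try omega
        subst hv
        simp [furthestInnerA, hb]
      · have h' : (nd (fun j => bh.contains j) js).map (· + 1) = some v := by
          simpa [nd, hb] using h
        obtain ⟨w, hw, hvw⟩ := Option.map_eq_some_iff.1 h'
        rw [show furthestInnerA bh (j :: js) S d = furthestInnerA bh js S (d + 1) from by
          simp [furthestInnerA, hb]]
        rw [ih S (d + 1) w hw]
        have heq : d + 1 + w = d + v := by omega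
        rw [heq]

theorem nd_none_iff (blk : Int → Bool) (L : List Int) :
    nd blk L = none ↔ ∀ j ∈ L, blk j = false := by
  induction L with
  | nil => simp [nd]
  | cons j js ih =>
      by_cases h : blk j
      · simp [nd, h]
      · have hf : blk j = false := by simpa using h
        simp [nd, hf, ih]

theorem outer_phase2 (bh : List Int) (n : Int) (L : List Int) :
    ∀ (S : PySem.Set Int) (d : Int),
    (∀ i ∈ L, nd (fun j => bh.contains j) (PySem.List.pyRange i n 1) = none) →
    (L.foldl (fun (st : PySem.Set Int × Int) i =>
        furthestInnerA bh (PySem.List.pyRange i n 1) st.1 st.2) (S, d)).1 = S := by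
  induction L with
  | nil => intro S d _; rfl
  | cons i L ih =>
      intro S d h
      have hi := h i (by simp)
      simp only [List.foldl_cons]
      rw [innerA_none bh _ S d hi]
      exact ih S _ (fun k hk => h k (by simp [hk]))

theorem outer_char (bh : List Int) (n : Int) : ∀ (m : Nat) (i : Int) (S : PySem.Set Int),
    i + (m : Int) = n →
    ((PySem.List.pyRange i n 1).foldl (fun (st : PySem.Set Int × Int) k =>
        furthestInnerA bh (PySem.List.pyRange k n 1) st.1 st.2) (S, 0)).1
      = PySem.Set.update S (vals (fun j => bh.contains j) n (PySem.List.pyRange i n 1)) := by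
  intro m
  induction m with
  | zero =>
      intro i S hm
      have : i = n := by omega
      subst this
      simp [vals, PySem.Set.update]
  | succ m ih =>
      intro i S hm
      have hin : i < n := by omega
      have hcons := PySem.List.pyRange_one_cons (a := i) (b := n) hin
      rw [hcons, List.foldl_cons]
      cases hnd : nd (fun j => bh.contains j) (PySem.List.pyRange i n 1) with
      | some v =>
          have hv : vals (fun j => bh.contains j) n (i :: PySem.List.pyRange (i + 1) n 1)
              = v :: vals (fun j => bh.contains j) n (PySem.List.pyRange (i + 1) n 1) := by
            rw [vals, List.filterMap_cons, hnd]; rfl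
          rw [show furthestInnerA bh (PySem.List.pyRange i n 1) S 0 = (PySem.Set.add S (0 + v), 0) from
            innerA_some bh _ S 0 v hnd]
          rw [zero_add, ih (i + 1) (PySem.Set.add S v) (by omega), hv]
          simp [PySem.Set.update]
      | none =>
          have hall : ∀ j ∈ PySem.List.pyRange i n 1, bh.contains j = false :=
            (nd_none_iff _ _).1 hnd
          have hnone : ∀ k, i ≤ k →
              nd (fun j => bh.contains j) (PySem.List.pyRange k n 1) = none := by
            intro k hk
            rw [nd_none_iff]
            intro j hj
            have hj' := (PySem.List.mem_pyRange_one).1 hj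
            exact hall j ((PySem.List.mem_pyRange_one).2 (by omega))
          have hv : vals (fun j => bh.contains j) n (i :: PySem.List.pyRange (i + 1) n 1) = [] := by
            rw [vals, List.filterMap_eq_nil_iff]
            intro k hk
            have hik : i ≤ k := by
              rcases List.mem_cons.1 hk with h | h
              · omega
              · have := (PySem.List.mem_pyRange_one).1 h; omega
            exact hnone k hik
          rw [show furthestInnerA bh (PySem.List.pyRange i n 1) S 0
              = (S, 0 + ((PySem.List.pyRange i n 1).length : Int)) from
            innerA_none bh _ S 0 hnd]
          rw [outer_phase2 bh n _ S _ (fun k hk => by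
            have hk' := (PySem.List.mem_pyRange_one).1 hk
            exact hnone k (by omega))]
          rw [hv]
          simp [PySem.Set.update]

theorem contains_ofList_eq (l : List Int) (x : Int) :
    PySem.Set.contains (PySem.Set.ofList l) x = l.contains x := by
  simp [PySem.Set.contains]

theorem altLoop_char (bh : List Int) (n : Int) : ∀ (m : Nat) (i : Int) (acc : List Int),
    i = (m : Int) → i ≤ n →
    furthestAltLoop (PySem.Set.ofList bh) (PySem.List.pyRange 0 i 1).reverse
        (nd (fun j => bh.contains j) (PySem.List.pyRange i n 1)) acc
      = acc ++ (vals (fun j => bh.contains j) n (PySem.List.pyRange 0 i 1)).reverse := by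
  intro m
  induction m with
  | zero =>
      intro i acc hi _
      subst hi
      simp [furthestAltLoop, vals]
  | succ m ih =>
      intro i acc hi hin
      have hsplit : PySem.List.pyRange 0 i 1 = PySem.List.pyRange 0 (m : Int) 1 ++ [(m : Int)] := by
        rw [hi, show ((m + 1 : Nat) : Int) = (m : Int) + 1 from by push_cast; ring]
        exact PySem.List.pyRange_one_succ_right (by positivity)
      have hmn : (m : Int) < n := by omega
      have hcons := PySem.List.pyRange_one_cons (a := (m : Int)) (b := n) hmn
      have hstep : nd (fun j => bh.contains j) (PySem.List.pyRange (m : Int) n 1)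
          = (if bh.contains (m : Int) then some 0
             else (nd (fun j => bh.contains j) (PySem.List.pyRange ((m : Int) + 1) n 1)).map (· + 1)) := by
        rw [hcons]; rfl
      have hir : nd (fun j => bh.contains j) (PySem.List.pyRange i n 1)
          = nd (fun j => bh.contains j) (PySem.List.pyRange ((m : Int) + 1) n 1) := by
        rw [hi, show ((m + 1 : Nat) : Int) = (m : Int) + 1 from by push_cast; ring]
      have hvals2 : vals (fun j => bh.contains j) n (PySem.List.pyRange 0 (m : Int) 1 ++ [(m : Int)])
          = vals (fun j => bh.contains j) n (PySem.List.pyRange 0 (m : Int) 1)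
            ++ (nd (fun j => bh.contains j) (PySem.List.pyRange (m : Int) n 1)).toList := by
        rw [vals, vals, List.filterMap_append]
        rfl
      rw [hsplit, hir]
      simp only [List.reverse_append, List.reverse_cons, List.reverse_nil, List.nil_append,
        List.cons_append]
      rw [show ∀ (d : Option Int) (rest : List Int) (dists : List Int),
          furthestAltLoop (PySem.Set.ofList bh) ((m : Int) :: rest) d dists
            = furthestAltLoop (PySem.Set.ofList bh) rest
                (if PySem.Set.contains (PySem.Set.ofList bh) (m : Int) then some 0
                 else match d with | some v => some (v + 1) | none => none)
                (match (if PySem.Set.contains (PySem.Set.ofList bh) (m : Int) then some 0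
                        else match d with | some v => some (v + 1) | none => none) with
                 | some v => dists ++ [v] | none => dists) from fun _ _ _ => rfl]
      rw [contains_ofList_eq]
      by_cases hb : bh.contains (m : Int)
      · have hd' : nd (fun j => bh.contains j) (PySem.List.pyRange (m : Int) n 1) = some 0 := by
          rw [hstep, if_pos hb]
        rw [if_pos hb]
        rw [show (match (some (0 : Int)) with | some v => acc ++ [v] | none => acc) = acc ++ [0] from rfl]
        rw [← hd', ih (m : Int) (acc ++ [0]) rfl (by omega), hvals2, hd']
        simp
      · rw [if_neg hb]
        cases hnd : nd (fun j => bh.contains j) (PySem.List.pyRange ((m : Int) + 1) n 1) with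
        | none =>
            have hd' : nd (fun j => bh.contains j) (PySem.List.pyRange (m : Int) n 1) = none := by
              rw [hstep, if_neg hb, hnd]; rfl
            rw [show (match (none : Option Int) with | some v => some (v + 1) | none => (none : Option Int)) = (none : Option Int) from rfl]
            rw [show (match (none : Option Int) with | some v => acc ++ [v] | none => acc) = acc from rfl]
            rw [← hd', ih (m : Int) acc rfl (by omega), hvals2, hd']
            simp
        | some v =>
            have hd' : nd (fun j => bh.contains j) (PySem.List.pyRange (m : Int) n 1) = some (v + 1) := by
              rw [hstep, if_neg hb, hnd]; rfl
            rw [show (match (some v : Option Int) with | some v => some (v + 1) | none => (none : Option Int)) = some (v + 1) from rfl]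
            rw [show (match (some (v + 1) : Option Int) with | some w => acc ++ [w] | none => acc) = acc ++ [v + 1] from rfl]
            rw [← hd', ih (m : Int) (acc ++ [v + 1]) rfl (by omega), hvals2, hd']
            simp

theorem max_ofList_eq_max_reverse (V : List Int) (hV : V ≠ []) :
    (PySem.List.max? (PySem.Set.ofList V) (fun x => x)).getD 0
      = (PySem.List.max? V.reverse (fun x => x)).getD 0 := by
  have h1 : PySem.Set.ofList V ≠ [] := by
    cases V with
    | nil => exact absurd rfl hV
    | cons v vs =>
        intro h
        have : v ∈ PySem.Set.ofList (v :: vs) := (PySem.Set.mem_ofList _ _).2 (by simp)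
        rw [h] at this; simp at this
  have h2 : V.reverse ≠ [] := by simpa using hV
  obtain ⟨a, ha⟩ : ∃ a, PySem.List.max? (PySem.Set.ofList V) (fun x => x) = some a := by
    cases hm : PySem.List.max? (PySem.Set.ofList V) (fun x => x) with
    | none => exact absurd ((PySem.List.max?_eq_none_iff _ _).1 hm) h1
    | some a => exact ⟨a, rfl⟩
  obtain ⟨b, hb⟩ : ∃ b, PySem.List.max? V.reverse (fun x => x) = some b := by
    cases hm : PySem.List.max? V.reverse (fun x => x) with
    | none => exact absurd ((PySem.List.max?_eq_none_iff _ _).1 hm) h2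
    | some b => exact ⟨b, rfl⟩
  have haV : a ∈ V := (PySem.Set.mem_ofList _ _).1 (PySem.List.max?_mem ha)
  have hbV : b ∈ V := by have := PySem.List.max?_mem hb; simpa using this
  have hab : a ≤ b := by
    have := PySem.List.max?_isMax hb a (by simpa using haV)
    simpa using this
  have hba : b ≤ a := by
    have := PySem.List.max?_isMax ha b ((PySem.Set.mem_ofList _ _).2 hbV)
    simpa using this
  rw [ha, hb]
  simp [le_antisymm hab hba]

-- ===== VERDICT (by name: the statement is the Claim_ definition above) =====
theorem furthest_spec : Claim_equal_furthest := by
  intro num_holes black_holes _ hpre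
  obtain ⟨j, hjmem, hj0, hjn⟩ := hpre
  unfold Spec_furthest furthest furthest_alt
  simp only []
  have hnn : (0 : Int) ≤ (num_holes.length : Int) := by positivity
  have houter := outer_char black_holes (num_holes.length : Int)
    (num_holes.length : Int).toNat 0 PySem.Set.empty (by omega)
  have hempty : PySem.List.pyRange ((num_holes.length : Int)) ((num_holes.length : Int)) 1 = [] := by
    rw [PySem.List.pyRange_one]; simp
  have halt := altLoop_char black_holes (num_holes.length : Int)
    (num_holes.length : Int).toNat (num_holes.length : Int) [] (by omega) le_rfl
  rw [hempty] at halt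
  simp only [nd] at halt
  rw [houter, halt]
  have hupd : PySem.Set.update PySem.Set.empty
      (vals (fun k => black_holes.contains k) (num_holes.length : Int)
        (PySem.List.pyRange 0 (num_holes.length : Int) 1))
      = PySem.Set.ofList (vals (fun k => black_holes.contains k) (num_holes.length : Int)
        (PySem.List.pyRange 0 (num_holes.length : Int) 1)) := by
    rw [PySem.Set.ofList_eq_foldl]; rfl
  rw [hupd]
  simp only [List.nil_append]
  apply max_ofList_eq_max_reverse
  -- nonempty: Pre_ provides a black-hole index j in range, contributing a recorded distance 0 at j
  have hjr : j ∈ PySem.List.pyRange 0 (num_holes.length : Int) 1 :=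
    (PySem.List.mem_pyRange_one).2 (by omega)
  have hndj : nd (fun k => black_holes.contains k)
      (PySem.List.pyRange j (num_holes.length : Int) 1) = some 0 := by
    rw [PySem.List.pyRange_one_cons hjn, nd]
    simp [hjmem]
  exact List.ne_nil_of_mem (List.mem_filterMap.2 ⟨j, hjr, hndj⟩)
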